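-- pv_equiv track=rewrite | github.com/etrotta/AdventOfCode2021 | python_puzzles/day_17/weird_1.py | get_valid_x_steps
-- ===== SOURCE A (Python) =====
-- def get_valid_x_steps(min_x, max_x):
--     valid = {}
--     for _dx in range(max_x):
--         steps = 0
--         dx = _dx
--         x = 0
--         while (x <= max_x and dx >= 0):
--             if x >= min_x:
--                 valid[_dx] = steps
--                 break
--             steps += 1
--             x += dx
--             dx -= 1
--     return valid
-- ===== SOURCE B (Python) =====
-- def _isqrt(n):
--     # integer floor square root by Newton's iteration (no imports needed)
--     if n < 2:
--         return n
--     x = n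
--     while True:
--         y = (x + n // x) // 2
--         if y < x:
--             x = y
--         else:
--             return x
--
--
-- def _first_step(dx, min_x):
--     # smallest s >= 0 with s*dx - s*(s-1)//2 >= min_x, or None if unreachable
--     if min_x <= 0:
--         return 0
--     b = 2 * dx + 1
--     d = b * b - 8 * min_x
--     if d < 0:
--         return None
--     r = _isqrt(d)
--     return (b - r + 1) // 2
--
--
-- def get_valid_x_steps(min_x, max_x):
--     valid = {}
--     for dx in range(max_x):
--         s = _first_step(dx, min_x)
--         if s is not None:
--             x = s * dx - s * (s - 1) // 2
--             if s <= dx and x <= max_x: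
--                 valid[dx] = s
--     return valid
-- ===== Notes on version B (the rewrite author's own statement) =====
-- stated objective: alternative
-- what changed: Replaces the per-velocity step-by-step simulation with closed-form quadratic reasoning: the position after s steps is s*dx - s*(s-1)/2, so the first step reaching min_x is obtained by solving s^2 - (2dx+1)s + 2*min_x <= 0 with an integer Newton square root, no inner simulation loop.
import Mathlib
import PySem

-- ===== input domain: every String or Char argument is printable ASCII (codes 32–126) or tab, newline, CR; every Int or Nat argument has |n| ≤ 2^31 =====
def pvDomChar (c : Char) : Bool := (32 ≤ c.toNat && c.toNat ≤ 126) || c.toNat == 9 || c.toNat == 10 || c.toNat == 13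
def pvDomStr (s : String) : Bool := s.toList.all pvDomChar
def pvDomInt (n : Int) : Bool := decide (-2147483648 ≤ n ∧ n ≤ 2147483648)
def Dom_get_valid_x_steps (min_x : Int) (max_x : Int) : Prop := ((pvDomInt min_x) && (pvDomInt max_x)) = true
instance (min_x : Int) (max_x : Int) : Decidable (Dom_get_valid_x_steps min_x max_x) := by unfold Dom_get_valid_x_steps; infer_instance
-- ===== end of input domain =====

-- B replaces A's per-velocity step simulation by a closed-form quadratic solve with an
-- integer Newton square root (objective: alternative algorithm; no speed claim).

-- ===== PORT A =====
-- inner 'while (x <= max_x and dx >= 0)' loop of A; terminates because dx decreases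
def loopA (min_x max_x _dx steps x dx : Int) (valid : PySem.Dict Int Int) : PySem.Dict Int Int :=
  if _h : x ≤ max_x ∧ dx ≥ 0 then
    if x ≥ min_x then valid.insert _dx steps
    else loopA min_x max_x _dx (steps + 1) (x + dx) (dx - 1) valid
  else valid
termination_by (dx + 1).toNat
decreasing_by omega

def get_valid_x_steps (min_x : Int) (max_x : Int) : List (Int × Int) :=
  ((PySem.List.pyRange 0 max_x 1).foldl
    (fun valid _dx => loopA min_x max_x _dx 0 0 _dx valid) PySem.Dict.empty).items

-- ===== PORT B =====
-- port of Source B's _isqrt Newton loop ('if 0 < x' is a totality guard only; Python keeps x ≥ 1)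
def isqrtLoop (n x : Int) : Int :=
  if _h : 0 < x then
    let y := PySem.Int.floordiv (x + PySem.Int.floordiv n x) 2
    if y < x then isqrtLoop n y else x
  else x
termination_by x.toNat
decreasing_by
  rename_i hy
  omega

def pyIsqrt (n : Int) : Int :=
  if n < 2 then n else isqrtLoop n n

def firstStep (dx min_x : Int) : Option Int :=
  if min_x ≤ 0 then some 0
  else
    let b := 2 * dx + 1
    let d := b * b - 8 * min_x
    if d < 0 then none
    else some (PySem.Int.floordiv (b - pyIsqrt d + 1) 2)

def get_valid_x_steps_alt (min_x : Int) (max_x : Int) : List (Int × Int) :=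
  ((PySem.List.pyRange 0 max_x 1).foldl
    (fun valid dx =>
      match firstStep dx min_x with
      | none => valid
      | some s =>
        let x := s * dx - PySem.Int.floordiv (s * (s - 1)) 2
        if s ≤ dx ∧ x ≤ max_x then valid.insert dx s else valid)
    PySem.Dict.empty).items

-- ===== PRECONDITION & SPEC =====
def Spec_get_valid_x_steps (min_x : Int) (max_x : Int) (out : List (Int × Int)) : Prop := out = get_valid_x_steps_alt min_x max_x
instance (min_x : Int) (max_x : Int) (out : List (Int × Int)) : Decidable (Spec_get_valid_x_steps min_x max_x out) := by unfold Spec_get_valid_x_steps; infer_instance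

-- ===== CLAIM (what is proved, stated in full; the proofs are below) =====
def Claim_equal_get_valid_x_steps : Prop := ∀ (min_x : Int) (max_x : Int), Dom_get_valid_x_steps min_x max_x → Spec_get_valid_x_steps min_x max_x (get_valid_x_steps min_x max_x)

-- ===== LEMMAS AND PROOFS =====

-- position after s steps starting with velocity dx
def Xv (dx s : Int) : Int := s * dx - PySem.Int.floordiv (s * (s - 1)) 2

lemma floordiv_two_mul (k : Int) : PySem.Int.floordiv (2 * k) 2 = k := by
  rw [PySem.Int.floordiv_eq_iff_of_pos (by omega)]
  omega

lemma two_Xv (dx s : Int) : 2 * Xv dx s = s * (2 * dx + 1 - s) := by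
  obtain ⟨k, hk⟩ : Even (s * (s - 1)) := Int.even_mul_pred_self s
  unfold Xv
  rw [hk, show k + k = 2 * k by ring, floordiv_two_mul]
  linear_combination hk

lemma Xv_succ (dx s : Int) : Xv dx (s + 1) = Xv dx s + (dx - s) := by
  have h1 := two_Xv dx s
  have h2 := two_Xv dx (s + 1)
  nlinarith [h1, h2]

-- Newton loop invariant: if x overestimates the root, the result is the floor sqrt
lemma isqrtLoop_spec (n x : Int) (hn : 0 ≤ n) (hx : 0 < x) (hinv : n < (x + 1) * (x + 1)) :
    0 ≤ isqrtLoop n x ∧ isqrtLoop n x * isqrtLoop n x ≤ n ∧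
      n < (isqrtLoop n x + 1) * (isqrtLoop n x + 1) := by
  rw [isqrtLoop, dif_pos hx]
  set q := PySem.Int.floordiv n x with hqdef
  set y := PySem.Int.floordiv (x + q) 2 with hydef
  have hq : q * x ≤ n ∧ n < (q + 1) * x := (PySem.Int.floordiv_eq_iff_of_pos hx).mp hqdef.symm
  have hy2 : y * 2 ≤ x + q ∧ x + q < (y + 1) * 2 :=
    (PySem.Int.floordiv_eq_iff_of_pos (by omega)).mp hydef.symm
  have hq0 : 0 ≤ q := by nlinarith [hq.2]
  by_cases hyx : y < x
  · simp only [if_pos hyx]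
    by_cases hy0 : 0 < y
    · have h4 : 4 * n < (x + q + 1) * (x + q + 1) := by nlinarith [sq_nonneg (x - q - 1), hq.2]
      have h5 : x + q + 1 ≤ 2 * (y + 1) := by omega
      exact isqrtLoop_spec n y hn hy0 (by nlinarith [h4, h5])
    · have hy0' : y = 0 := by omega
      rw [isqrtLoop, dif_neg (by omega)]
      refine ⟨by omega, by nlinarith, ?_⟩
      have hx1 : x = 1 ∧ q = 0 := by omega
      nlinarith [hq.2, hx1.1, hx1.2]
  · simp only [if_neg hyx]
    exact ⟨by omega, by nlinarith [hq.1, hy2.1], hinv⟩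
termination_by x.toNat
decreasing_by simp only [← hqdef, ← hydef]; omega

lemma pyIsqrt_spec (n : Int) (hn : 0 ≤ n) :
    0 ≤ pyIsqrt n ∧ pyIsqrt n * pyIsqrt n ≤ n ∧ n < (pyIsqrt n + 1) * (pyIsqrt n + 1) := by
  rw [pyIsqrt]
  by_cases h2 : n < 2
  · rw [if_pos h2]
    have : n = 0 ∨ n = 1 := by omega
    rcases this with h | h <;> subst h <;> norm_num
  · rw [if_neg h2]
    exact isqrtLoop_spec n n hn (by omega) (by nlinarith)

-- A's inner loop never records if the position never reaches min_x while dx ≥ 0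
lemma loopA_none (min_x max_x _dx : Int) (s : Int) (valid : PySem.Dict Int Int)
    (hs : 0 ≤ s)
    (hall : ∀ t, s ≤ t → t ≤ _dx → Xv _dx t < min_x) :
    loopA min_x max_x _dx s (Xv _dx s) (_dx - s) valid = valid := by
  rw [loopA]
  by_cases hg : Xv _dx s ≤ max_x ∧ _dx - s ≥ 0
  · rw [dif_pos hg]
    rw [if_neg (by have := hall s le_rfl (by omega); omega)]
    rw [show Xv _dx s + (_dx - s) = Xv _dx (s + 1) from (Xv_succ _dx s).symm,
        show _dx - s - 1 = _dx - (s + 1) by ring]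
    exact loopA_none min_x max_x _dx (s + 1) valid (by omega)
      (fun t ht1 ht2 => hall t (by omega) ht2)
  · rw [dif_neg hg]
termination_by (_dx + 1 - s).toNat
decreasing_by omega

-- A's inner loop exits without recording when the first position ≥ min_x overshoots max_x
lemma loopA_over (min_x max_x _dx : Int) (sstar s : Int) (valid : PySem.Dict Int Int)
    (hs : 0 ≤ s) (hss : s ≤ sstar)
    (hbefore : ∀ t, s ≤ t → t < sstar → Xv _dx t < min_x)
    (hover : max_x < Xv _dx sstar) :
    loopA min_x max_x _dx s (Xv _dx s) (_dx - s) valid = valid := by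
  rw [loopA]
  by_cases hg : Xv _dx s ≤ max_x ∧ _dx - s ≥ 0
  · have hlt : s < sstar := by
      rcases lt_or_eq_of_le hss with h | h
      · exact h
      · exact absurd hg.1 (by rw [h]; omega)
    rw [dif_pos hg]
    rw [if_neg (by have := hbefore s le_rfl hlt; omega)]
    rw [show Xv _dx s + (_dx - s) = Xv _dx (s + 1) from (Xv_succ _dx s).symm,
        show _dx - s - 1 = _dx - (s + 1) by ring]
    exact loopA_over min_x max_x _dx sstar (s + 1) valid (by omega) (by omega)
      (fun t ht1 ht2 => hbefore t (by omega) ht2) hover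
  · rw [dif_neg hg]
termination_by (sstar + 1 - s).toNat
decreasing_by omega

-- A's inner loop records (sstar) when the first position ≥ min_x lands inside the range
lemma loopA_insert (min_x max_x _dx : Int) (sstar s : Int) (valid : PySem.Dict Int Int)
    (hs : 0 ≤ s) (hss : s ≤ sstar) (hsd : sstar ≤ _dx)
    (hbefore : ∀ t, s ≤ t → t < sstar → Xv _dx t < min_x)
    (hmono : ∀ t, s ≤ t → t ≤ sstar → Xv _dx t ≤ Xv _dx sstar)
    (hhit : min_x ≤ Xv _dx sstar) (hin : Xv _dx sstar ≤ max_x) :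
    loopA min_x max_x _dx s (Xv _dx s) (_dx - s) valid = valid.insert _dx sstar := by
  rw [loopA]
  rcases lt_or_eq_of_le hss with hlt | heq
  · rw [dif_pos ⟨le_trans (hmono s le_rfl hss) hin, by omega⟩]
    rw [if_neg (by have := hbefore s le_rfl hlt; omega)]
    rw [show Xv _dx s + (_dx - s) = Xv _dx (s + 1) from (Xv_succ _dx s).symm,
        show _dx - s - 1 = _dx - (s + 1) by ring]
    exact loopA_insert min_x max_x _dx sstar (s + 1) valid (by omega) (by omega) hsd
      (fun t ht1 ht2 => hbefore t (by omega) ht2)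
      (fun t ht1 ht2 => hmono t (by omega) ht2) hhit hin
  · subst heq
    rw [dif_pos ⟨hin, by omega⟩, if_pos hhit]
termination_by (sstar + 1 - s).toNat
decreasing_by omega

-- per-velocity agreement of the two step functions
lemma step_eq (min_x max_x dx : Int) (hdx : 0 ≤ dx) (hlt : dx < max_x)
    (valid : PySem.Dict Int Int) :
    loopA min_x max_x dx 0 0 dx valid =
      (match firstStep dx min_x with
       | none => valid
       | some s =>
         let x := s * dx - PySem.Int.floordiv (s * (s - 1)) 2
         if s ≤ dx ∧ x ≤ max_x then valid.insert dx s else valid) := by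
  have hX0 : Xv dx 0 = 0 := by have := two_Xv dx 0; omega
  by_cases hm : min_x ≤ 0
  · -- the target is reached immediately at step 0
    simp only [firstStep, if_pos hm]
    have hrhs : Xv dx 0 ≤ max_x := by omega
    rw [loopA, dif_pos ⟨by omega, by omega⟩, if_pos (by omega)]
    have : ((0:Int) ≤ dx ∧ Xv dx 0 ≤ max_x) := ⟨hdx, hrhs⟩
    simp only [Xv] at this
    rw [if_pos (by simpa using this)]
  · -- solve s^2 - (2dx+1)s + 2*min_x <= 0
    have hm1 : 1 ≤ min_x := by omega
    set b := 2 * dx + 1 with hb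
    set d := b * b - 8 * min_x with hd
    have hbsq : b * b = 4 * (dx * dx + dx) + 1 := by rw [hb]; ring
    by_cases hdneg : d < 0
    · -- unreachable: position always below min_x
      simp only [firstStep, if_neg hm, ← hb, ← hd, if_pos hdneg]
      have h0 : loopA min_x max_x dx 0 0 dx valid = loopA min_x max_x dx 0 (Xv dx 0) (dx - 0) valid := by
        rw [hX0]; norm_num
      rw [h0]
      exact loopA_none min_x max_x dx 0 valid le_rfl
        (fun t ht1 ht2 => by nlinarith [two_Xv dx t, sq_nonneg (b - 2 * t)])
    · have hr := pyIsqrt_spec d (by omega)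
      set r := pyIsqrt d with hrdef
      obtain ⟨hr0, hrl, hru⟩ := hr
      set sstar := PySem.Int.floordiv (b - r + 1) 2 with hsdef
      have hbr : sstar * 2 ≤ b - r + 1 ∧ b - r + 1 < (sstar + 1) * 2 :=
        (PySem.Int.floordiv_eq_iff_of_pos (by omega)).mp hsdef.symm
      have hr1 : 1 ≤ r := by
        rcases Int.lt_or_le r 1 with h | h
        · have : r = 0 := by omega
          rw [this] at hrl hru
          omega
        · exact h
      have hrb : r < b := by nlinarith
      have hf3 : 1 ≤ sstar := by omega
      have hf4 : sstar ≤ dx := by omega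
      have hhit : min_x ≤ Xv dx sstar := by
        nlinarith [two_Xv dx sstar, sq_nonneg (b - 2 * sstar), mul_self_le_mul_self (by omega : (0:Int) ≤ b - 2 * sstar) (by omega : b - 2 * sstar ≤ r)]
      have hbefore : ∀ t, 0 ≤ t → t < sstar → Xv dx t < min_x := by
        intro t ht1 ht2
        have hge : r + 1 ≤ b - 2 * t := by omega
        nlinarith [two_Xv dx t, mul_self_le_mul_self (by omega : (0:Int) ≤ r + 1) hge]
      have hmono : ∀ t, 0 ≤ t → t ≤ sstar → Xv dx t ≤ Xv dx sstar := by
        intro t ht1 ht2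
        nlinarith [two_Xv dx t, two_Xv dx sstar, mul_nonneg (by omega : (0:Int) ≤ sstar - t) (by omega : (0:Int) ≤ b - sstar - t)]
      have h0 : loopA min_x max_x dx 0 0 dx valid = loopA min_x max_x dx 0 (Xv dx 0) (dx - 0) valid := by
        rw [hX0]; norm_num
      simp only [firstStep, if_neg hm, ← hb, ← hd, if_neg hdneg, ← hrdef, ← hsdef]
      have hxeq : sstar * dx - PySem.Int.floordiv (sstar * (sstar - 1)) 2 = Xv dx sstar := rfl
      rw [hxeq, h0]
      by_cases hin : Xv dx sstar ≤ max_x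
      · rw [if_pos ⟨hf4, hin⟩]
        exact loopA_insert min_x max_x dx sstar 0 valid le_rfl (by omega) hf4
          (fun t ht1 ht2 => hbefore t ht1 ht2) (fun t ht1 ht2 => hmono t ht1 ht2) hhit hin
      · rw [if_neg (by tauto)]
        exact loopA_over min_x max_x dx sstar 0 valid le_rfl (by omega)
          (fun t ht1 ht2 => hbefore t ht1 ht2) (by omega)

-- ===== VERDICT (by name: the statement is the Claim_ definition above) =====
theorem get_valid_x_steps_spec : Claim_equal_get_valid_x_steps := by
  intro min_x max_x _
  unfold Spec_get_valid_x_steps get_valid_x_steps get_valid_x_steps_alt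
  congr 1
  apply PySem.List.foldl_congr_mem
  intro valid dx hmem
  rw [PySem.List.mem_pyRange_one] at hmem
  exact step_eq min_x max_x dx hmem.1 hmem.2 valid
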